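-- pv_equiv track=rewrite | github.com/M-Umair-J/vulneramind | backend/core/scanner/cve_mapper_real.py | _get_highest_severity
-- ===== SOURCE A (Python) =====
-- from typing import Dict, List, Optional
--
-- def _get_highest_severity(cves: List[Dict]) -> str:
--     """Get the highest severity level from CVEs."""
--     severity_order = {'CRITICAL': 4, 'HIGH': 3, 'MEDIUM': 2, 'LOW': 1, 'UNKNOWN': 0}
--
--     highest = 0
--     highest_severity = 'UNKNOWN'
--
--     for cve in cves:
--         severity = cve.get('severity', 'UNKNOWN')
--         if severity_order.get(severity, 0) > highest:
--             highest = severity_order[severity]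
--             highest_severity = severity
--
--     return highest_severity
-- ===== SOURCE B (Python) =====
-- def _get_highest_severity(cves):
--     """Get the highest severity level from CVEs."""
--     for name in ('CRITICAL', 'HIGH', 'MEDIUM', 'LOW'):
--         if any(cve.get('severity') == name for cve in cves):
--             return name
--     return 'UNKNOWN'
-- ===== Notes on version B (the rewrite author's own statement) =====
-- stated objective: simpler
-- what changed: Instead of a numeric score table and a single scan tracking a running maximum, B loops over the four severity names in descending priority and returns the first one any CVE carries, with 'UNKNOWN' as fallback.
import Mathlib
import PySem

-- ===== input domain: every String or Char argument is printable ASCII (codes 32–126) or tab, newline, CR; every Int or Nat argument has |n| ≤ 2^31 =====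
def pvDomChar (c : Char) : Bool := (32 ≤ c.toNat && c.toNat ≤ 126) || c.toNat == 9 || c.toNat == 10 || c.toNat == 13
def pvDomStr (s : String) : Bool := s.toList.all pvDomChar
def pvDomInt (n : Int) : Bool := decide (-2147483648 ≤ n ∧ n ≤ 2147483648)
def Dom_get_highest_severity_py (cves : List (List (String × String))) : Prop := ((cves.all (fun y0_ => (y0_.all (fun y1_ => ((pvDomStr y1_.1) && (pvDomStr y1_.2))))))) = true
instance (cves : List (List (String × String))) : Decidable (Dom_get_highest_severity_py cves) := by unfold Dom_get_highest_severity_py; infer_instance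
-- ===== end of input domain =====

-- B replaces A's numeric score table and running-max scan with a loop over the
-- four severity names in descending priority, returning the first one any CVE
-- carries (objective: simpler; same return value on every input).

-- ===== PORT A =====
-- Literal port of A: fold over the CVEs keeping (highest, highest_severity).
-- severity_order[severity] is only evaluated when severity_order.get(severity, 0) > highest ≥ 0,
-- so the key is present and the getD below equals Python's raising indexing there.
def get_highest_severity_py (cves : List (List (String × String))) : String :=
  let severity_order : PySem.Dict String Int :=
    PySem.Dict.mk [("CRITICAL", 4), ("HIGH", 3), ("MEDIUM", 2), ("LOW", 1), ("UNKNOWN", 0)]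
  (cves.foldl
    (fun (st : Int × String) cve =>
      let severity := (PySem.Dict.mk cve).getD "severity" "UNKNOWN"
      if severity_order.getD severity 0 > st.1 then
        (severity_order.getD severity 0, severity)
      else st)
    (0, "UNKNOWN")).2

-- ===== PORT B =====
-- Port of Source B: probe the priority names in order; first name present wins.
def pvProbe (cves : List (List (String × String))) : List String → String
  | [] => "UNKNOWN"
  | n :: rest =>
      if cves.any (fun cve => (PySem.Dict.mk cve).get? "severity" == some n) then n
      else pvProbe cves rest

def get_highest_severity_py_alt (cves : List (List (String × String))) : String :=
  pvProbe cves ["CRITICAL", "HIGH", "MEDIUM", "LOW"]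

-- ===== PRECONDITION & SPEC =====
def Spec_get_highest_severity_py (cves : List (List (String × String))) (out : String) : Prop := out = get_highest_severity_py_alt cves
instance (cves : List (List (String × String))) (out : String) : Decidable (Spec_get_highest_severity_py cves out) := by unfold Spec_get_highest_severity_py; infer_instance

-- ===== CLAIM (what is proved, stated in full; the proofs are below) =====
def Claim_equal_get_highest_severity_py : Prop := ∀ (cves : List (List (String × String))), Dom_get_highest_severity_py cves → Spec_get_highest_severity_py cves (get_highest_severity_py cves)

-- ===== LEMMAS AND PROOFS =====

-- A's loop body as a named function (definitionally equal to the lambda in the port)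
def pvStepA (st : Int × String) (cve : List (String × String)) : Int × String :=
  let severity := (PySem.Dict.mk cve).getD "severity" "UNKNOWN"
  if (PySem.Dict.mk [("CRITICAL", (4:Int)), ("HIGH", 3), ("MEDIUM", 2), ("LOW", 1), ("UNKNOWN", 0)]).getD severity 0 > st.1 then
    ((PySem.Dict.mk [("CRITICAL", (4:Int)), ("HIGH", 3), ("MEDIUM", 2), ("LOW", 1), ("UNKNOWN", 0)]).getD severity 0, severity)
  else st

-- the severity string A reads from a CVE
def pvSev (cve : List (String × String)) : String :=
  (PySem.Dict.mk cve).getD "severity" "UNKNOWN"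

-- A's score table as a function
def pvScore (s : String) : Int :=
  if s = "CRITICAL" then 4 else if s = "HIGH" then 3 else if s = "MEDIUM" then 2
  else if s = "LOW" then 1 else 0

-- the name a positive score stands for
def pvName (n : Int) : String :=
  if n = 4 then "CRITICAL" else if n = 3 then "HIGH" else if n = 2 then "MEDIUM"
  else if n = 1 then "LOW" else "UNKNOWN"

-- maximum score over the list (A's `highest` from initial 0)
def pvM (cves : List (List (String × String))) : Int :=
  cves.foldl (fun a c => max a (pvScore (pvSev c))) 0

lemma pvScore_nonneg (s : String) : 0 ≤ pvScore s := by
  unfold pvScore; split_ifs <;> omega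

lemma pvScore_le_four (s : String) : pvScore s ≤ 4 := by
  unfold pvScore; split_ifs <;> omega

lemma pvName_pvScore (s : String) (h : 0 < pvScore s) : s = pvName (pvScore s) := by
  unfold pvScore at *; unfold pvName
  split_ifs at h ⊢ <;> simp_all

-- the literal severity_order dict looks up to pvScore
lemma order_getD (s : String) :
    (PySem.Dict.mk [("CRITICAL", (4:Int)), ("HIGH", 3), ("MEDIUM", 2), ("LOW", 1), ("UNKNOWN", 0)]).getD s 0
      = pvScore s := by
  by_cases h1 : s = "CRITICAL"
  · subst h1; decide
  by_cases h2 : s = "HIGH"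
  · subst h2; decide
  by_cases h3 : s = "MEDIUM"
  · subst h3; decide
  by_cases h4 : s = "LOW"
  · subst h4; decide
  by_cases h5 : s = "UNKNOWN"
  · subst h5; decide
  have g1 : ("CRITICAL" == s) = false := beq_eq_false_iff_ne.mpr (Ne.symm h1)
  have g2 : ("HIGH" == s) = false := beq_eq_false_iff_ne.mpr (Ne.symm h2)
  have g3 : ("MEDIUM" == s) = false := beq_eq_false_iff_ne.mpr (Ne.symm h3)
  have g4 : ("LOW" == s) = false := beq_eq_false_iff_ne.mpr (Ne.symm h4)
  have g5 : ("UNKNOWN" == s) = false := beq_eq_false_iff_ne.mpr (Ne.symm h5)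
  simp only [PySem.Dict.getD_eq_get?_getD, PySem.Dict.get?_mk_cons, g1, g2, g3, g4, g5,
    if_false, Bool.false_eq_true, pvScore, h1, h2, h3, h4]
  simp [PySem.Dict.get?]

lemma pvStepA_eq (st : Int × String) (cve : List (String × String)) :
    pvStepA st cve
      = if pvScore (pvSev cve) > st.1 then (pvScore (pvSev cve), pvSev cve) else st := by
  simp only [pvStepA, order_getD]
  rfl

lemma foldl_max_init (l : List (List (String × String))) (a : Int) (ha : 0 ≤ a) :
    l.foldl (fun x c => max x (pvScore (pvSev c))) a = max a (pvM l) := by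
  induction l generalizing a with
  | nil => simp only [List.foldl_nil, pvM]; omega
  | cons c l ih =>
      have hs := pvScore_nonneg (pvSev c)
      have h1 := ih (max a (pvScore (pvSev c))) (by omega)
      have h2 := ih (max 0 (pvScore (pvSev c))) (by omega)
      simp only [pvM, List.foldl_cons] at *
      rw [h1, h2]; omega

lemma pvM_nonneg (cves : List (List (String × String))) : 0 ≤ pvM cves := by
  have := foldl_max_init cves 0 le_rfl
  unfold pvM at *; omega

lemma pvM_cons (c : List (String × String)) (l : List (List (String × String))) :
    pvM (c :: l) = max (pvScore (pvSev c)) (pvM l) := by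
  have hs := pvScore_nonneg (pvSev c)
  have := foldl_max_init l (max 0 (pvScore (pvSev c))) (by omega)
  simp only [pvM, List.foldl_cons] at *
  rw [this]; omega

-- characterisation of A's loop
lemma loopA_spec (cves : List (List (String × String))) (h : Int) (hs : String) (hh : 0 ≤ h) :
    cves.foldl pvStepA (h, hs)
      = (max h (pvM cves), if h < pvM cves then pvName (pvM cves) else hs) := by
  induction cves generalizing h hs with
  | nil =>
      simp only [List.foldl_nil, pvM, List.foldl_nil]
      rw [max_eq_left hh, if_neg (by omega)]
  | cons c rest ih =>
      have hMr := pvM_nonneg rest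
      have hs0 := pvScore_nonneg (pvSev c)
      rw [List.foldl_cons, pvStepA_eq, pvM_cons]
      by_cases hgt : pvScore (pvSev c) > h
      · rw [if_pos hgt, ih _ (pvSev c) (by omega)]
        have hname := pvName_pvScore (pvSev c) (by omega)
        by_cases hlt : pvScore (pvSev c) < pvM rest
        · have hmx : max (pvScore (pvSev c)) (pvM rest) = pvM rest := by omega
          rw [hmx, if_pos hlt, if_pos (show h < pvM rest by omega),
            show max h (pvM rest) = pvM rest from by omega]
        · have hmx : max (pvScore (pvSev c)) (pvM rest) = pvScore (pvSev c) := by omega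
          rw [hmx, if_neg hlt, if_pos hgt, ← hname,
            show max h (pvScore (pvSev c)) = pvScore (pvSev c) from by omega]
      · rw [if_neg hgt, ih h hs hh]
        have hsle : pvScore (pvSev c) ≤ h := by omega
        by_cases hc2 : h < pvM rest
        · have hmx : max (pvScore (pvSev c)) (pvM rest) = pvM rest := by omega
          rw [hmx]
        · have hng : ¬ h < max (pvScore (pvSev c)) (pvM rest) := by omega
          rw [if_neg hc2, if_neg hng,
            show max h (max (pvScore (pvSev c)) (pvM rest)) = max h (pvM rest) from by omega]

lemma A_eq_name (cves : List (List (String × String))) :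
    get_highest_severity_py cves = pvName (pvM cves) := by
  have hport : get_highest_severity_py cves = (cves.foldl pvStepA (0, "UNKNOWN")).2 := rfl
  rw [hport, loopA_spec cves 0 "UNKNOWN" le_rfl]
  have := pvM_nonneg cves
  by_cases h : 0 < pvM cves
  · simp [h]
  · have h0 : pvM cves = 0 := by omega
    simp [h0, pvName]

-- a CVE carries name n (n not "UNKNOWN") iff A reads severity n from it
lemma get?_eq_some_iff (cve : List (String × String)) (n : String) (hn : n ≠ "UNKNOWN") :
    ((PySem.Dict.mk cve).get? "severity" == some n) = true ↔ pvSev cve = n := by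
  unfold pvSev
  rw [PySem.Dict.getD_eq_get?_getD]
  cases hg : (PySem.Dict.mk cve).get? "severity" with
  | none => simp [Ne.symm hn]
  | some v => simp

lemma score_le_M (cves : List (List (String × String))) (c : List (String × String))
    (hc : c ∈ cves) : pvScore (pvSev c) ≤ pvM cves := by
  induction cves with
  | nil => cases hc
  | cons d rest ih =>
      rw [pvM_cons]
      rcases List.mem_cons.mp hc with rfl | hc
      · omega
      · have := ih hc; omega

lemma M_attained (cves : List (List (String × String))) :
    pvM cves = 0 ∨ ∃ c ∈ cves, pvScore (pvSev c) = pvM cves := by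
  induction cves with
  | nil => left; rfl
  | cons d rest ih =>
      rw [pvM_cons]
      have h0 := pvM_nonneg rest
      have hs := pvScore_nonneg (pvSev d)
      by_cases hle : pvM rest ≤ pvScore (pvSev d)
      · right; exact ⟨d, List.mem_cons_self, by omega⟩
      · rcases ih with h | ⟨c, hc, hsc⟩
        · omega
        · right; exact ⟨c, List.mem_cons_of_mem _ hc, by omega⟩

lemma M_eq_of_exists (cves : List (List (String × String))) (k : Int)
    (hex : ∃ c ∈ cves, pvScore (pvSev c) = k)
    (hno : ∀ c ∈ cves, pvScore (pvSev c) ≤ k) : pvM cves = k := by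
  obtain ⟨c, hc, hsc⟩ := hex
  have hk0 : 0 ≤ k := hsc ▸ pvScore_nonneg (pvSev c)
  have h1 := score_le_M cves c hc
  rcases M_attained cves with h | ⟨d, hd, hsd⟩
  · omega
  · have := hno d hd; omega

lemma B_eq_name (cves : List (List (String × String))) :
    get_highest_severity_py_alt cves = pvName (pvM cves) := by
  unfold get_highest_severity_py_alt
  have hsev : ∀ (n : String), n ≠ "UNKNOWN" →
      ((cves.any (fun cve => (PySem.Dict.mk cve).get? "severity" == some n))
        = decide (∃ c ∈ cves, pvSev c = n)) := by
    intro n hn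
    rcases h : cves.any (fun cve => (PySem.Dict.mk cve).get? "severity" == some n) with _ | _
    · symm; rw [decide_eq_false_iff_not]
      rintro ⟨c, hc, hp⟩
      have : cves.any (fun cve => (PySem.Dict.mk cve).get? "severity" == some n) = true :=
        List.any_eq_true.mpr ⟨c, hc, (get?_eq_some_iff c n hn).mpr hp⟩
      rw [h] at this; exact Bool.false_ne_true this
    · symm; rw [decide_eq_true_iff]
      obtain ⟨c, hc, hp⟩ := List.any_eq_true.mp h
      exact ⟨c, hc, (get?_eq_some_iff c n hn).mp hp⟩
  have hscore4 : ∀ c, pvScore (pvSev c) = 4 ↔ pvSev c = "CRITICAL" := by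
    intro c; unfold pvScore; split_ifs <;> simp_all
  have hscore3 : ∀ c, pvScore (pvSev c) = 3 ↔ pvSev c = "HIGH" := by
    intro c; unfold pvScore; split_ifs <;> simp_all
  have hscore2 : ∀ c, pvScore (pvSev c) = 2 ↔ pvSev c = "MEDIUM" := by
    intro c; unfold pvScore; split_ifs <;> simp_all
  have hscore1 : ∀ c, pvScore (pvSev c) = 1 ↔ pvSev c = "LOW" := by
    intro c; unfold pvScore; split_ifs <;> simp_all
  by_cases e4 : ∃ c ∈ cves, pvSev c = "CRITICAL"
  · have hM : pvM cves = 4 := by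
      apply M_eq_of_exists cves 4
      · obtain ⟨c, hc, hcc⟩ := e4; exact ⟨c, hc, (hscore4 c).mpr hcc⟩
      · intro c _; exact pvScore_le_four _
    rw [hM]
    simp only [pvProbe, hsev "CRITICAL" (by decide), e4, decide_true, if_true]
    decide
  · by_cases e3 : ∃ c ∈ cves, pvSev c = "HIGH"
    · have hM : pvM cves = 3 := by
        apply M_eq_of_exists cves 3
        · obtain ⟨c, hc, hcc⟩ := e3; exact ⟨c, hc, (hscore3 c).mpr hcc⟩
        · intro c hc
          have := pvScore_le_four (pvSev c)
          by_contra hgt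
          exact e4 ⟨c, hc, (hscore4 c).mp (by omega)⟩
      rw [hM]
      simp only [pvProbe, hsev "CRITICAL" (by decide), hsev "HIGH" (by decide), e4, e3,
        decide_true, decide_false, if_true, Bool.false_eq_true, if_false]
      decide
    · by_cases e2 : ∃ c ∈ cves, pvSev c = "MEDIUM"
      · have hM : pvM cves = 2 := by
          apply M_eq_of_exists cves 2
          · obtain ⟨c, hc, hcc⟩ := e2; exact ⟨c, hc, (hscore2 c).mpr hcc⟩
          · intro c hc
            have := pvScore_le_four (pvSev c)
            by_contra hgt
            have h34 : pvScore (pvSev c) = 4 ∨ pvScore (pvSev c) = 3 := by omega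
            rcases h34 with h' | h'
            · exact e4 ⟨c, hc, (hscore4 c).mp h'⟩
            · exact e3 ⟨c, hc, (hscore3 c).mp h'⟩
        rw [hM]
        simp only [pvProbe, hsev "CRITICAL" (by decide), hsev "HIGH" (by decide),
          hsev "MEDIUM" (by decide), e4, e3, e2,
          decide_true, decide_false, if_true, Bool.false_eq_true, if_false]
        decide
      · by_cases e1 : ∃ c ∈ cves, pvSev c = "LOW"
        · have hM : pvM cves = 1 := by
            apply M_eq_of_exists cves 1
            · obtain ⟨c, hc, hcc⟩ := e1; exact ⟨c, hc, (hscore1 c).mpr hcc⟩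
            · intro c hc
              have := pvScore_le_four (pvSev c)
              have := pvScore_nonneg (pvSev c)
              by_contra hgt
              have h234 : pvScore (pvSev c) = 4 ∨ pvScore (pvSev c) = 3 ∨ pvScore (pvSev c) = 2 := by omega
              rcases h234 with h' | h' | h'
              · exact e4 ⟨c, hc, (hscore4 c).mp h'⟩
              · exact e3 ⟨c, hc, (hscore3 c).mp h'⟩
              · exact e2 ⟨c, hc, (hscore2 c).mp h'⟩
          rw [hM]
          simp only [pvProbe, hsev "CRITICAL" (by decide), hsev "HIGH" (by decide),
            hsev "MEDIUM" (by decide), hsev "LOW" (by decide), e4, e3, e2, e1,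
            decide_true, decide_false, if_true, Bool.false_eq_true, if_false]
          decide
        · have hM : pvM cves = 0 := by
            rcases M_attained cves with h | ⟨c, hc, hsc⟩
            · exact h
            · have hle := pvScore_le_four (pvSev c)
              have hge := pvScore_nonneg (pvSev c)
              have hM0 := pvM_nonneg cves
              by_contra hne
              have h1234 : pvScore (pvSev c) = 4 ∨ pvScore (pvSev c) = 3 ∨
                  pvScore (pvSev c) = 2 ∨ pvScore (pvSev c) = 1 := by omega
              rcases h1234 with h' | h' | h' | h'
              · exact e4 ⟨c, hc, (hscore4 c).mp h'⟩
              · exact e3 ⟨c, hc, (hscore3 c).mp h'⟩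
              · exact e2 ⟨c, hc, (hscore2 c).mp h'⟩
              · exact e1 ⟨c, hc, (hscore1 c).mp h'⟩
          rw [hM]
          simp only [pvProbe, hsev "CRITICAL" (by decide), hsev "HIGH" (by decide),
            hsev "MEDIUM" (by decide), hsev "LOW" (by decide), e4, e3, e2, e1,
            decide_false, Bool.false_eq_true, if_false]
          decide

-- ===== VERDICT (by name: the statement is the Claim_ definition above) =====
theorem get_highest_severity_py_spec : Claim_equal_get_highest_severity_py := by
  intro cves _
  unfold Spec_get_highest_severity_py
  rw [A_eq_name, B_eq_name]
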